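-- pv_equiv track=rewrite | github.com/RaminMammadzada/wc-product-list-generator | main/helper2.py | extraxtFactoryCode
-- ===== SOURCE A (Python) =====
-- def extraxtFactoryCode(string):
--     index = 0
--     totalNumberOfDash = 0
--     for character in string:
--         if(character == "-"):
--             totalNumberOfDash += 1
--         if(totalNumberOfDash == 2):
--             return string[:index], index
--
--         index += 1
-- ===== SOURCE B (Python) =====
-- def extraxtFactoryCode(string):
--     parts = string.split('-', 2)
--     if len(parts) < 3:
--         return None
--     prefix = '-'.join(parts[:2])
--     return prefix, len(prefix)
-- ===== Notes on version B (the rewrite author's own statement) =====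
-- stated objective: simpler
-- what changed: Replaces the character-by-character loop with its index and dash-counter state by tokenization: split the string into at most three dash-delimited segments, rejoin the first two, and read the index off as the prefix length (the scan happens inside str.split instead of a Python-level loop).
import Mathlib
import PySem

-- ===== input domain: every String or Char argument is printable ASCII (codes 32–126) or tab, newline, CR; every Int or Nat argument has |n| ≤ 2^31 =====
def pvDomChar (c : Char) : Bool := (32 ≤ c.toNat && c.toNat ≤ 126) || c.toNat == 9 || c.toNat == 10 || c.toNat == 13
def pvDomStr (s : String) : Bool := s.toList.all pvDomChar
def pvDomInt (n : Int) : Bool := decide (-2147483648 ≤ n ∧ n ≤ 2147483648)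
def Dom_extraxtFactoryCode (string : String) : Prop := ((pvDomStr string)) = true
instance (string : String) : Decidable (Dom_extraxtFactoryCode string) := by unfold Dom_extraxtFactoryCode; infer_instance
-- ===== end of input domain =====

-- B replaces A's character loop (index + dash counter) by tokenization: split('-', 2), rejoin the first two segments, read the index off as the prefix length; same O(n) cost, different decomposition.


-- ===== PORT A =====
-- the for-loop of A: remaining characters, current index, current dash count
def extraxtFactoryCodeLoop (s : String) : List Char → Int → Int → Option (String × Int)
  | [], _, _ => none
  | c :: rest, index, totalNumberOfDash =>
    let totalNumberOfDash := if c = '-' then totalNumberOfDash + 1 else totalNumberOfDash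
    if totalNumberOfDash = 2 then some (PySem.Str.slice s none (some index), index)
    else extraxtFactoryCodeLoop s rest (index + 1) totalNumberOfDash

def extraxtFactoryCode (string : String) : Option (String × Int) :=
  extraxtFactoryCodeLoop string string.toList 0 0

-- ===== PORT B =====
def extraxtFactoryCode_alt (string : String) : Option (String × Int) :=
  match PySem.Str.splitMax? string "-" 2 with
  | none => none   -- unreachable: the separator "-" is non-empty
  | some parts =>
    if parts.length < 3 then none
    else
      let pfx := PySem.Str.join "-" (PySem.List.slice parts none (some 2))
      some (pfx, PySem.Str.len pfx)

-- ===== PRECONDITION & SPEC =====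
def Spec_extraxtFactoryCode (string : String) (out : Option (String × Int)) : Prop := out = extraxtFactoryCode_alt string
instance (string : String) (out : Option (String × Int)) : Decidable (Spec_extraxtFactoryCode string out) := by unfold Spec_extraxtFactoryCode; infer_instance

-- ===== CLAIM (what is proved, stated in full; the proofs are below) =====
def Claim_equal_extraxtFactoryCode : Prop := ∀ (string : String), Dom_extraxtFactoryCode string → Spec_extraxtFactoryCode string (extraxtFactoryCode string)

-- ===== LEMMAS AND PROOFS =====

-- A's loop after the first dash has been seen: finds the next dash
theorem loopA_one (l : List Char) (s : String) (idx : Int) :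
    extraxtFactoryCodeLoop s l idx 1 =
      match l.findIdx? (fun c => c = '-') with
      | some j => some (PySem.Str.slice s none (some (idx + j)), idx + j)
      | none => none := by
  induction l generalizing idx with
  | nil => simp [extraxtFactoryCodeLoop]
  | cons c t ih =>
    by_cases hc : c = '-'
    · simp [extraxtFactoryCodeLoop, hc, List.findIdx?_cons]
    · rw [List.findIdx?_cons]
      simp only [hc, decide_eq_true_eq]
      rw [extraxtFactoryCodeLoop]
      simp only [if_neg hc]
      norm_num
      rw [ih]
      cases h : t.findIdx? (fun c => c = '-') with
      | none => simp
      | some j =>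
        simp only [Option.map_some]
        push_cast
        ring_nf

-- A's loop before any dash: skips to just after the first dash
theorem loopA_zero (l : List Char) (s : String) (idx : Int) :
    extraxtFactoryCodeLoop s l idx 0 =
      match l.findIdx? (fun c => c = '-') with
      | some i => extraxtFactoryCodeLoop s (l.drop (i + 1)) (idx + i + 1) 1
      | none => none := by
  induction l generalizing idx with
  | nil => simp [extraxtFactoryCodeLoop]
  | cons c t ih =>
    by_cases hc : c = '-'
    · simp [extraxtFactoryCodeLoop, hc, List.findIdx?_cons]
    · rw [List.findIdx?_cons]
      simp only [hc, decide_eq_true_eq]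
      rw [extraxtFactoryCodeLoop]
      simp only [if_neg hc]
      norm_num
      rw [ih]
      cases h : t.findIdx? (fun c => c = '-') with
      | none => simp
      | some i =>
        simp only [Option.map_some]
        push_cast
        ring_nf

-- splitOnMax.go with zero splits left returns immediately
theorem go_zero (fuel : ℕ) (l cur : List Char) (acc : List (List Char)) :
    PySem.Chars.splitOnMax.go ['-'] fuel 0 l cur acc = ((cur.reverse ++ l) :: acc).reverse := by
  cases fuel with
  | zero => rfl
  | succ f => cases l with
    | nil => simp [PySem.Chars.splitOnMax.go]
    | cons c t => simp [PySem.Chars.splitOnMax.go]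

-- splitOnMax.go with splits left: splits off the segment up to the first dash
theorem go_dash (m : ℕ) (hm : m ≠ 0) (l : List Char) :
    ∀ (fuel : ℕ) (cur : List Char) (acc : List (List Char)), l.length < fuel →
    PySem.Chars.splitOnMax.go ['-'] fuel m l cur acc =
      match l.findIdx? (fun c => c = '-') with
      | none => ((cur.reverse ++ l) :: acc).reverse
      | some i => PySem.Chars.splitOnMax.go ['-'] (fuel - (i + 1)) (m - 1) (l.drop (i + 1)) []
                    ((cur.reverse ++ l.take i) :: acc) := by
  induction l with
  | nil =>
    intro fuel cur acc hf
    cases fuel with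
    | zero => omega
    | succ f => simp [PySem.Chars.splitOnMax.go]
  | cons c t ih =>
    intro fuel cur acc hf
    cases fuel with
    | zero => simp at hf
    | succ f =>
      by_cases hc : c = '-'
      · rw [List.findIdx?_cons]
        simp only [hc, decide_true]
        show PySem.Chars.splitOnMax.go ['-'] (f+1) m ('-' :: t) cur acc = _
        rw [PySem.Chars.splitOnMax.go]
        simp [hm, List.isPrefixOf]
      · rw [List.findIdx?_cons]
        simp only [hc, decide_false]
        show PySem.Chars.splitOnMax.go ['-'] (f+1) m (c :: t) cur acc = _
        rw [PySem.Chars.splitOnMax.go]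
        have hpre : ['-'].isPrefixOf (c :: t) = false := by
          simp [List.isPrefixOf]; exact fun h => hc h.symm
        simp only [hm, hpre, if_neg (Bool.false_ne_true ∘ id)]
        have ht : t.length < f := by simpa using Nat.lt_of_succ_lt_succ hf
        rw [ih f (c :: cur) acc ht]
        cases h : t.findIdx? (fun x => x = '-') with
        | none => simp
        | some i =>
          simp only [Option.map_some]
          have h1 : f - (i + 1) = f + 1 - (i + 1 + 1) := by omega
          have h2 : (c :: cur).reverse ++ t.take i = cur.reverse ++ (c :: t).take (i + 1) := by
            simp [List.take_succ_cons]
          rw [h1, h2]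
          rfl

-- characterization of the three-way split used by B
theorem splitOnMax_two (l : List Char) :
    PySem.Chars.splitOnMax l ['-'] 2 =
      match l.findIdx? (fun c => c = '-') with
      | none => [l]
      | some i =>
        match (l.drop (i + 1)).findIdx? (fun c => c = '-') with
        | none => [l.take i, l.drop (i + 1)]
        | some j => [l.take i, (l.drop (i + 1)).take j, (l.drop (i + 1)).drop (j + 1)] := by
  unfold PySem.Chars.splitOnMax
  rw [if_neg (by norm_num : ¬ (2:ℤ) < 0)]
  show PySem.Chars.splitOnMax.go ['-'] (l.length + 1) 2 l [] [] = _
  rw [go_dash 2 (by norm_num) l (l.length + 1) [] [] (by omega)]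
  cases h1 : l.findIdx? (fun c => c = '-') with
  | none => simp
  | some i =>
    have hi : i < l.length := (List.findIdx?_eq_some_iff_getElem.mp h1).1
    simp only []
    rw [go_dash 1 (by norm_num) (l.drop (i + 1)) (l.length + 1 - (i + 1)) [] _ (by simp; omega)]
    cases h2 : (l.drop (i + 1)).findIdx? (fun c => c = '-') with
    | none => simp
    | some j =>
      simp only []
      rw [go_zero]
      simp

theorem splitTwo_none (l : List Char) (h : l.findIdx? (fun c => c = '-') = none) :
    PySem.Chars.splitOnMax l ['-'] 2 = [l] := by rw [splitOnMax_two, h]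

theorem splitTwo_one (l : List Char) (i : ℕ) (h1 : l.findIdx? (fun c => c = '-') = some i)
    (h2 : (l.drop (i + 1)).findIdx? (fun c => c = '-') = none) :
    PySem.Chars.splitOnMax l ['-'] 2 = [l.take i, l.drop (i + 1)] := by
  rw [splitOnMax_two, h1]; simp only [h2]

theorem splitTwo_two (l : List Char) (i j : ℕ) (h1 : l.findIdx? (fun c => c = '-') = some i)
    (h2 : (l.drop (i + 1)).findIdx? (fun c => c = '-') = some j) :
    PySem.Chars.splitOnMax l ['-'] 2 =
      [l.take i, (l.drop (i + 1)).take j, (l.drop (i + 1)).drop (j + 1)] := by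
  rw [splitOnMax_two, h1]; simp only [h2]

theorem loopA_zero_none (l : List Char) (s : String) (idx : Int)
    (h : l.findIdx? (fun c => c = '-') = none) :
    extraxtFactoryCodeLoop s l idx 0 = none := by rw [loopA_zero, h]

theorem loopA_zero_some (l : List Char) (s : String) (idx : Int) (i : ℕ)
    (h : l.findIdx? (fun c => c = '-') = some i) :
    extraxtFactoryCodeLoop s l idx 0 = extraxtFactoryCodeLoop s (l.drop (i + 1)) (idx + i + 1) 1 := by
  rw [loopA_zero, h]

theorem loopA_one_none (l : List Char) (s : String) (idx : Int)
    (h : l.findIdx? (fun c => c = '-') = none) :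
    extraxtFactoryCodeLoop s l idx 1 = none := by rw [loopA_one, h]

theorem loopA_one_some (l : List Char) (s : String) (idx : Int) (j : ℕ)
    (h : l.findIdx? (fun c => c = '-') = some j) :
    extraxtFactoryCodeLoop s l idx 1 = some (PySem.Str.slice s none (some (idx + j)), idx + j) := by
  rw [loopA_one, h]

theorem toList_inj' (s t : String) (h : s.toList = t.toList) : s = t := by
  have := congrArg String.ofList h
  simpa using this

-- ===== VERDICT (by name: the statement is the Claim_ definition above) =====
theorem extraxtFactoryCode_spec : Claim_equal_extraxtFactoryCode := by
  intro s _
  unfold Spec_extraxtFactoryCode extraxtFactoryCode extraxtFactoryCode_alt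
  have hsplit : PySem.Str.splitMax? s "-" 2 =
      some ((PySem.Chars.splitOnMax s.toList ['-'] 2).map String.ofList) := by
    unfold PySem.Str.splitMax? PySem.Chars.splitMax?
    simp
  rw [hsplit]
  cases h1 : s.toList.findIdx? (fun c => c = '-') with
  | none =>
    rw [loopA_zero_none _ _ _ h1, splitTwo_none _ h1]
    simp
  | some i =>
    obtain ⟨hi, hpi, -⟩ := List.findIdx?_eq_some_iff_getElem.mp h1
    rw [loopA_zero_some _ _ _ _ h1]
    cases h2 : (s.toList.drop (i + 1)).findIdx? (fun c => c = '-') with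
    | none =>
      rw [loopA_one_none _ _ _ h2, splitTwo_one _ _ h1 h2]
      simp
    | some j =>
      obtain ⟨hj, hpj, -⟩ := List.findIdx?_eq_some_iff_getElem.mp h2
      rw [loopA_one_some _ _ _ _ h2, splitTwo_two _ _ _ h1 h2]
      simp only [List.map_cons, List.map_nil, List.length_cons, List.length_nil]
      rw [if_neg (by omega)]
      have hslice : PySem.List.slice
          [String.ofList (s.toList.take i), String.ofList ((s.toList.drop (i + 1)).take j),
           String.ofList ((s.toList.drop (i + 1)).drop (j + 1))] none (some 2) =
          [String.ofList (s.toList.take i), String.ofList ((s.toList.drop (i + 1)).take j)] := by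
        rw [PySem.List.slice_to _ (by norm_num)]
        rfl
      rw [hslice]
      have hjoin : (PySem.Str.join "-" [String.ofList (s.toList.take i),
          String.ofList ((s.toList.drop (i + 1)).take j)]).toList =
          s.toList.take i ++ '-' :: (s.toList.drop (i + 1)).take j := by
        unfold PySem.Str.join PySem.Chars.join
        simp [List.intercalate]
      have hdash : s.toList[i] = '-' := by simpa using hpi
      have htake : s.toList.take (i + 1 + j) =
          s.toList.take i ++ '-' :: (s.toList.drop (i + 1)).take j := by
        rw [List.take_add, List.take_add_one, List.getElem?_eq_getElem hi, hdash]
        simp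
      have hstr : PySem.Str.slice s none (some (0 + (i : Int) + 1 + (j : Int))) =
          PySem.Str.join "-" [String.ofList (s.toList.take i),
            String.ofList ((s.toList.drop (i + 1)).take j)] := by
        apply toList_inj'
        rw [hjoin, PySem.Str.toList_slice]
        have hcast : (0 + (i : Int) + 1 + (j : Int)) = ((i + 1 + j : ℕ) : Int) := by push_cast; ring
        rw [hcast]
        simp only [PySem.Chars.slice_eq_listSlice]
        rw [PySem.List.slice_to _ (by positivity)]
        simpa using htake
      have hlen : PySem.Str.len (PySem.Str.join "-" [String.ofList (s.toList.take i),
          String.ofList ((s.toList.drop (i + 1)).take j)]) = 0 + (i : Int) + 1 + (j : Int) := by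
        rw [PySem.Str.len_eq, hjoin]
        have hsl : s.toList.length = s.length := by simp
        have hj' : j < s.length - (i + 1) := by
          have := hj; simp [hsl] at this; omega
        have hi' : i < s.length := by omega
        simp [List.length_take, List.length_drop, hsl]
        omega
      simp only [hstr, hlen]
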